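-- pv_equiv track=rewrite | github.com/SunJ1ayu/skillify-auditor | scripts/check_resolvable.py | _analyze_conflict_severity
-- ===== SOURCE A (Python) =====
-- from typing import List, Dict, Set, Tuple, Optional
--
-- def _analyze_conflict_severity(trigger: str, skills: List[str]) -> str:
--     """分析冲突严重程度"""
--     # 精确匹配的触发词冲突更严重
--     if len(trigger) <= 3:
--         return "high"  # 短触发词容易误触发
--
--     # 检查是否是子串包含关系
--     for skill in skills:
--         other_skills = [s for s in skills if s != skill]
--         for other in other_skills:
--             if skill.lower() in other.lower() or other.lower() in skill.lower():
--                 return "high"  # 名称相似的技能冲突严重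
--
--     return "medium"
-- ===== SOURCE B (Python) =====
-- from typing import List
--
-- def _analyze_conflict_severity(trigger: str, skills: List[str]) -> str:
--     if len(trigger) <= 3:
--         return "high"
--     # Sort lowercased skills by length; a substring can only live in an
--     # equal-or-longer string, so each entry is compared only with later ones.
--     entries = sorted(((s.lower(), s) for s in skills), key=lambda e: len(e[0]))
--     for i, (low, orig) in enumerate(entries):
--         for hlow, horig in entries[i + 1:]:
--             if low in hlow and orig != horig:
--                 return "high"
--     return "medium"
-- ===== Notes on version B (the rewrite author's own statement) =====
-- stated objective: alternative
-- what changed: Replaces the symmetric all-pairs scan (which builds a filtered list and re-lowercases per pair) by a single pass over skills pre-lowercased and sorted by length ascending, comparing each entry only against later (equal-or-longer) entries, using that substring containment implies length ordering.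
import Mathlib
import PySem

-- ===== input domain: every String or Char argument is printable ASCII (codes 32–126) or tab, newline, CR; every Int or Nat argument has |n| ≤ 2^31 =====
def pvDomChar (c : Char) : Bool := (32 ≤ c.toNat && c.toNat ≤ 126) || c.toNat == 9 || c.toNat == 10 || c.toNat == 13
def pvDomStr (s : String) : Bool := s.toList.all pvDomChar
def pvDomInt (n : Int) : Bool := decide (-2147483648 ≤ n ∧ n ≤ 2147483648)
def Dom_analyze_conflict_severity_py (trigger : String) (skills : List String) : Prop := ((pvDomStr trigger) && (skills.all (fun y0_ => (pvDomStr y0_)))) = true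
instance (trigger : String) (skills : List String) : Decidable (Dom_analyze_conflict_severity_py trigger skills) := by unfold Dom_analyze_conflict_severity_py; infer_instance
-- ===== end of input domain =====

-- B: pre-lowercase once, sort by length ascending, compare each entry only with later ones (alternative decomposition, not claimed faster).
-- ===== PORT A =====
def analyze_conflict_severity_py (trigger : String) (skills : List String) : String :=
  if PySem.Str.len trigger ≤ 3 then "high"
  else if skills.any (fun skill =>
      (skills.filter (fun s => s != skill)).any (fun other =>
        PySem.Str.isIn (PySem.Str.lower skill) (PySem.Str.lower other) ||
        PySem.Str.isIn (PySem.Str.lower other) (PySem.Str.lower skill)))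
  then "high" else "medium"

-- ===== PORT B =====
-- the outer 'for i' / inner 'for … in entries[i+1:]' loop of Source B
def pvAltScan : List (String × String) → Bool
  | [] => false
  | (low, orig) :: rest =>
      rest.any (fun h => PySem.Str.isIn low h.1 && orig != h.2) || pvAltScan rest

def analyze_conflict_severity_py_alt (trigger : String) (skills : List String) : String :=
  if PySem.Str.len trigger ≤ 3 then "high"
  else
    let entries := PySem.List.sorted (skills.map (fun s => (PySem.Str.lower s, s))) (fun e => PySem.Str.len e.1) false
    if pvAltScan entries then "high" else "medium"

-- ===== PRECONDITION & SPEC =====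
def Spec_analyze_conflict_severity_py (trigger : String) (skills : List String) (out : String) : Prop := out = analyze_conflict_severity_py_alt trigger skills
instance (trigger : String) (skills : List String) (out : String) : Decidable (Spec_analyze_conflict_severity_py trigger skills out) := by unfold Spec_analyze_conflict_severity_py; infer_instance

-- ===== CLAIM (what is proved, stated in full; the proofs are below) =====
def Claim_equal_analyze_conflict_severity_py : Prop := ∀ (trigger : String) (skills : List String), Dom_analyze_conflict_severity_py trigger skills → Spec_analyze_conflict_severity_py trigger skills (analyze_conflict_severity_py trigger skills)

-- ===== LEMMAS AND PROOFS =====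
theorem scan_false_iff (es : List (String × String)) :
    pvAltScan es = false ↔ es.Pairwise (fun e h => ¬(e.1.toList <:+: h.1.toList ∧ e.2 ≠ h.2)) := by
  induction es with
  | nil => simp [pvAltScan]
  | cons e rest ih =>
    obtain ⟨low, orig⟩ := e
    simp [pvAltScan, ih, List.pairwise_cons, PySem.Chars.isIn_iff_infix, not_and]

theorem a_any_iff (skills : List String) :
    (skills.any (fun skill =>
      (skills.filter (fun s => s != skill)).any (fun other =>
        PySem.Str.isIn (PySem.Str.lower skill) (PySem.Str.lower other) ||
        PySem.Str.isIn (PySem.Str.lower other) (PySem.Str.lower skill))) = true) ↔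
    ∃ x ∈ skills, ∃ y ∈ skills, y ≠ x ∧
      ((PySem.Str.lower x).toList <:+: (PySem.Str.lower y).toList ∨
       (PySem.Str.lower y).toList <:+: (PySem.Str.lower x).toList) := by
  simp [List.any_eq_true, PySem.Chars.isIn_iff_infix, bne_iff_ne, PySem.Str.toList_lower]

theorem main_iff (skills : List String) :
    (∃ x ∈ skills, ∃ y ∈ skills, y ≠ x ∧
      ((PySem.Str.lower x).toList <:+: (PySem.Str.lower y).toList ∨
       (PySem.Str.lower y).toList <:+: (PySem.Str.lower x).toList)) ↔
    pvAltScan (PySem.List.sorted (skills.map (fun s => (PySem.Str.lower s, s)))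
        (fun e => PySem.Str.len e.1) false) = true := by
  set es := PySem.List.sorted (skills.map (fun s => (PySem.Str.lower s, s)))
      (fun e => PySem.Str.len e.1) false with hes
  have hmem : ∀ e, e ∈ es ↔ e ∈ skills.map (fun s => (PySem.Str.lower s, s)) :=
    PySem.List.mem_sorted (skills.map (fun s => (PySem.Str.lower s, s))) (fun e => PySem.Str.len e.1) false
  have hscan : pvAltScan es = true ↔
      ¬ es.Pairwise (fun e h => ¬(e.1.toList <:+: h.1.toList ∧ e.2 ≠ h.2)) := by
    rw [← scan_false_iff]; cases h : pvAltScan es <;> simp_all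
  rw [hscan, List.pairwise_iff_getElem]
  push Not
  constructor
  · rintro ⟨x, hx, y, hy, hyx, hsub⟩
    have hex : (PySem.Str.lower x, x) ∈ es := (hmem _).2 (List.mem_map.2 ⟨x, hx, rfl⟩)
    have hey : (PySem.Str.lower y, y) ∈ es := (hmem _).2 (List.mem_map.2 ⟨y, hy, rfl⟩)
    obtain ⟨i, hi, hie⟩ := List.mem_iff_getElem.mp hex
    obtain ⟨j, hj, hje⟩ := List.mem_iff_getElem.mp hey
    have hij : i ≠ j := by
      intro h; subst h; rw [hie] at hje
      exact hyx (congrArg Prod.snd hje).symm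
    rcases hsub with hsub | hsub
    · rcases lt_or_gt_of_ne hij with hlt | hgt
      · exact ⟨i, j, hi, hj, hlt, by rw [hie, hje]; exact ⟨hsub, fun h => hyx h.symm⟩⟩
      · have hle := PySem.List.key_sorted_getElem_mono (skills.map (fun s => (PySem.Str.lower s, s)))
          (fun e => PySem.Str.len e.1) (le_of_lt hgt) (hes ▸ hi)
        have hle2 : PySem.Str.len es[j].1 ≤ PySem.Str.len es[i].1 := hle
        rw [hie, hje] at hle2
        have h1 := List.IsInfix.length_le hsub
        have hlen : (PySem.Str.lower x).toList.length = (PySem.Str.lower y).toList.length := by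
          simp [PySem.Str.len_eq, PySem.Str.toList_lower] at hle2 h1 ⊢; omega
        have heq := List.IsInfix.eq_of_length hsub hlen
        exact ⟨j, i, hj, hi, hgt, by rw [hie, hje]; exact ⟨by rw [heq], hyx⟩⟩
    · rcases lt_or_gt_of_ne hij with hlt | hgt
      · have hle := PySem.List.key_sorted_getElem_mono (skills.map (fun s => (PySem.Str.lower s, s)))
          (fun e => PySem.Str.len e.1) (le_of_lt hlt) (hes ▸ hj)
        have hle2 : PySem.Str.len es[i].1 ≤ PySem.Str.len es[j].1 := hle
        rw [hie, hje] at hle2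
        have h1 := List.IsInfix.length_le hsub
        have hlen : (PySem.Str.lower y).toList.length = (PySem.Str.lower x).toList.length := by
          simp [PySem.Str.len_eq, PySem.Str.toList_lower] at hle2 h1 ⊢; omega
        have heq := List.IsInfix.eq_of_length hsub hlen
        exact ⟨i, j, hi, hj, hlt, by rw [hie, hje]; exact ⟨by rw [heq], fun h => hyx h.symm⟩⟩
      · exact ⟨j, i, hj, hi, hgt, by rw [hie, hje]; exact ⟨hsub, hyx⟩⟩
  · rintro ⟨i, j, hi, hj, hij, hcond⟩
    obtain ⟨hsub, hne⟩ := hcond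
    have hei : es[i] ∈ es := List.getElem_mem hi
    have hej : es[j] ∈ es := List.getElem_mem hj
    obtain ⟨x, hx, hxe⟩ := List.mem_map.1 ((hmem _).1 hei)
    obtain ⟨y, hy, hye⟩ := List.mem_map.1 ((hmem _).1 hej)
    refine ⟨x, hx, y, hy, ?_, ?_⟩
    · intro h; subst h
      apply hne; rw [← hxe, ← hye]
    · left; rw [← hxe] at hsub; rw [← hye] at hsub; exact hsub

-- ===== VERDICT (by name: the statement is the Claim_ definition above) =====
theorem analyze_conflict_severity_py_spec : Claim_equal_analyze_conflict_severity_py := by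
  intro trigger skills _
  unfold Spec_analyze_conflict_severity_py
  unfold analyze_conflict_severity_py analyze_conflict_severity_py_alt
  have hb : (skills.any (fun skill =>
      (skills.filter (fun s => s != skill)).any (fun other =>
        PySem.Str.isIn (PySem.Str.lower skill) (PySem.Str.lower other) ||
        PySem.Str.isIn (PySem.Str.lower other) (PySem.Str.lower skill)))) =
      pvAltScan (PySem.List.sorted (skills.map (fun s => (PySem.Str.lower s, s)))
        (fun e => PySem.Str.len e.1) false) :=
    Bool.eq_iff_iff.mpr ((a_any_iff skills).trans (main_iff skills))
  rw [hb]
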